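-- pv_equiv track=rewrite | github.com/vvrmahendra/DS-AlgoPrac | graphs/batches.py | solve
-- ===== SOURCE A (Python) =====
-- def solve(A, B, C, D):
--     s = [i for i in range(A+1)]
--     p = [i for i in range(A+1)]
--     size = [1]*(A+1)
--     ans = [0]+B
--     for l, r in C:
--         pl = l
--         while pl != p[pl]:
--             pl = p[pl]
--
--         pr = r
--         while pr != p[pr]:
--             pr = p[pr]
--
--         if pl == pr:
--             continue
--
--         if size[pl] >= size[pr]:
--             p[pr] = pl
--             size[pl] += size[pr]
--             ans[pl] += ans[pr]
--
--         else:
--             p[pl] = pr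
--             size[pr] += size[pl]
--             ans[pr] += ans[pl]
--
--     res = 0
--     for i in range(1, A+1):
--         if s[i] == p[i] and ans[i] >= D:
--             res += 1
--
--     return res
-- ===== SOURCE B (Python) =====
-- def solve(A, B, C, D):
--     # Flat component-label array with small-to-large member relabeling:
--     # O(1) root lookup instead of walking a parent forest.
--     comp = list(range(A + 1))
--     size = [1] * (A + 1)
--     weight = [0] + B
--     members = [[i] for i in range(A + 1)]
--     for l, r in C:
--         cl, cr = comp[l], comp[r]
--         if cl == cr:
--             continue
--         if size[cl] < size[cr]:
--             cl, cr = cr, cl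
--         for x in members[cr]:
--             comp[x] = cl
--         members[cl] = members[cl] + members[cr]
--         members[cr] = []
--         size[cl] += size[cr]
--         weight[cl] += weight[cr]
--     res = 0
--     for i in range(1, A + 1):
--         if comp[i] == i and weight[i] >= D:
--             res += 1
--     return res
-- ===== Notes on version B (the rewrite author's own statement) =====
-- stated objective: alternative
-- what changed: A walks a parent forest (union-by-size DSU without path compression) to find each root; B keeps no parent forest at all: a flat component-label array gives the root in one read, and unions relabel the smaller class small-to-large via per-class member lists.
import Mathlib
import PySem

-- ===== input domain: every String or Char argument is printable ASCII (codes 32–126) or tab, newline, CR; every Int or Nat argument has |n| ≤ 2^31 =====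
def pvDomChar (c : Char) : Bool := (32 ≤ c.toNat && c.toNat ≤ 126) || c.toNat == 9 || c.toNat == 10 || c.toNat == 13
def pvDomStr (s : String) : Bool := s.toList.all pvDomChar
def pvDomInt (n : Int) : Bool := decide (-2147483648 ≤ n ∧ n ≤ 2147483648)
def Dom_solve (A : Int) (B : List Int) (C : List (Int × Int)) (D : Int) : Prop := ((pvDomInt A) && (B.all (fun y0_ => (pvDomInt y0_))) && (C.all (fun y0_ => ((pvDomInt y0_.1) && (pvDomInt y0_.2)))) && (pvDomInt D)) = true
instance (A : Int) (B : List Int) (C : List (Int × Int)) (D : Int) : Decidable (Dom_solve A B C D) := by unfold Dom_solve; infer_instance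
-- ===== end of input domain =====

-- B replaces A's parent-forest DSU (find by walking parents, union by size) with a flat
-- component-label array updated by small-to-large relabeling: root lookup is a single array
-- read instead of a parent walk (objective: alternative).


-- ===== PORT A =====
-- while pl != p[pl]: pl = p[pl]   (fuel-bounded; fuel only makes it total — on Pre_ inputs
-- the walk stabilizes within the fuel, proved below)
def solveFind (p : List Int) (x : Int) : Nat → Int
  | 0 => x
  | f + 1 =>
    if x = PySem.List.pyGetD p x 0 then x
    else solveFind p (PySem.List.pyGetD p x 0) f

-- one iteration of A's `for l, r in C` loop over the state (p, size, ans); F = len(C)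
def solveStepA (F : Nat) (st : List Int × List Int × List Int) (lr : Int × Int) :
    List Int × List Int × List Int :=
  let pl := solveFind st.1 lr.1 (F + 1)
  let pr := solveFind st.1 lr.2 (F + 1)
  if pl = pr then st
  else if PySem.List.pyGetD st.2.1 pl 0 ≥ PySem.List.pyGetD st.2.1 pr 0 then
    (PySem.List.pySetD st.1 pr pl,
     PySem.List.pySetD st.2.1 pl (PySem.List.pyGetD st.2.1 pl 0 + PySem.List.pyGetD st.2.1 pr 0),
     PySem.List.pySetD st.2.2 pl (PySem.List.pyGetD st.2.2 pl 0 + PySem.List.pyGetD st.2.2 pr 0))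
  else
    (PySem.List.pySetD st.1 pl pr,
     PySem.List.pySetD st.2.1 pr (PySem.List.pyGetD st.2.1 pr 0 + PySem.List.pyGetD st.2.1 pl 0),
     PySem.List.pySetD st.2.2 pr (PySem.List.pyGetD st.2.2 pr 0 + PySem.List.pyGetD st.2.2 pl 0))

def solve (A : Int) (B : List Int) (C : List (Int × Int)) (D : Int) : Int :=
  let s := PySem.List.pyRange 0 (A + 1) 1
  let st := C.foldl (solveStepA C.length)
    (PySem.List.pyRange 0 (A + 1) 1, List.replicate (A + 1).toNat (1 : Int), (0 : Int) :: B)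
  (PySem.List.pyRange 1 (A + 1) 1).foldl
    (fun res i =>
      if PySem.List.pyGetD s i 0 = PySem.List.pyGetD st.1 i 0 ∧ D ≤ PySem.List.pyGetD st.2.2 i 0
      then res + 1 else res) 0

-- ===== PORT B =====
-- one iteration of B's loop over the state (comp, size, weight, members)
def solveStepB (st : List Int × List Int × List Int × List (List Int)) (lr : Int × Int) :
    List Int × List Int × List Int × List (List Int) :=
  let cl0 := PySem.List.pyGetD st.1 lr.1 0
  let cr0 := PySem.List.pyGetD st.1 lr.2 0
  if cl0 = cr0 then st
  else
    let cl := if PySem.List.pyGetD st.2.1 cl0 0 < PySem.List.pyGetD st.2.1 cr0 0 then cr0 else cl0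
    let cr := if PySem.List.pyGetD st.2.1 cl0 0 < PySem.List.pyGetD st.2.1 cr0 0 then cl0 else cr0
    ((PySem.List.pyGetD st.2.2.2 cr []).foldl (fun c x => PySem.List.pySetD c x cl) st.1,
     PySem.List.pySetD st.2.1 cl (PySem.List.pyGetD st.2.1 cl 0 + PySem.List.pyGetD st.2.1 cr 0),
     PySem.List.pySetD st.2.2.1 cl
       (PySem.List.pyGetD st.2.2.1 cl 0 + PySem.List.pyGetD st.2.2.1 cr 0),
     PySem.List.pySetD
       (PySem.List.pySetD st.2.2.2 cl
         (PySem.List.pyGetD st.2.2.2 cl [] ++ PySem.List.pyGetD st.2.2.2 cr [])) cr [])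

def solve_alt (A : Int) (B : List Int) (C : List (Int × Int)) (D : Int) : Int :=
  let st := C.foldl solveStepB
    (PySem.List.pyRange 0 (A + 1) 1, List.replicate (A + 1).toNat (1 : Int), (0 : Int) :: B,
     (PySem.List.pyRange 0 (A + 1) 1).map (fun i => [i]))
  (PySem.List.pyRange 1 (A + 1) 1).foldl
    (fun res i =>
      if PySem.List.pyGetD st.1 i 0 = i ∧ D ≤ PySem.List.pyGetD st.2.2.1 i 0
      then res + 1 else res) 0

-- ===== PRECONDITION & SPEC =====
-- Pre_ excludes exactly the inputs where the Python A raises an IndexError: a weight list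
-- shorter than A (the final loop reads ans[1..A]), an edge endpoint outside [-(A+1), A]
-- (list index out of range), and negative A with a non-empty edge list (p is empty).
def Pre_solve (A : Int) (B : List Int) (C : List (Int × Int)) (D : Int) : Prop :=
  A ≤ (B.length : Int) ∧ (0 ≤ A ∨ C = []) ∧
  ∀ lr ∈ C, (-(A + 1) ≤ lr.1 ∧ lr.1 < A + 1) ∧ (-(A + 1) ≤ lr.2 ∧ lr.2 < A + 1)
instance (A : Int) (B : List Int) (C : List (Int × Int)) (D : Int) :
    Decidable (Pre_solve A B C D) := by unfold Pre_solve; infer_instance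

def pvWitness_solve : Int × List Int × (List (Int × Int)) × Int := (2, [3, 4], [(1, 2)], 5)

def Spec_solve (A : Int) (B : List Int) (C : List (Int × Int)) (D : Int) (out : Int) : Prop :=
  out = solve_alt A B C D
instance (A : Int) (B : List Int) (C : List (Int × Int)) (D : Int) (out : Int) :
    Decidable (Spec_solve A B C D out) := by unfold Spec_solve; infer_instance

-- ===== CLAIM (what is proved, stated in full; the proofs are below) =====
def Claim_equal_solve : Prop := ∀ (A : Int) (B : List Int) (C : List (Int × Int)) (D : Int),
  Dom_solve A B C D → Pre_solve A B C D → Spec_solve A B C D (solve A B C D)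

-- ===== LEMMAS AND PROOFS =====

-- value of an in-range read of range(A+1)
theorem rangeGet (n i : Int) (h0 : 0 ≤ i) (h1 : i < n) :
    PySem.List.pyGetD (PySem.List.pyRange 0 n 1) i 0 = i := by
  simpa using PySem.List.pyGetD_map_pyRange_of_nonneg (fun x => x) n i 0 h0 h1

theorem rangeLen (n : Int) (h : 0 ≤ n) :
    (PySem.List.pyRange 0 n 1).length = n.toNat := by
  rw [show n = ((n.toNat : Nat) : Int) by omega, PySem.List.pyRange_zero_natCast]
  rw [List.length_map, List.length_range]
  omega

theorem rangeNil (a b : Int) (h : b ≤ a) : PySem.List.pyRange a b 1 = [] := by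
  unfold PySem.List.pyRange
  split
  · simp_all
  · simp_all

-- read-after-write for nonnegative indices
theorem getD_setD {α : Type} (xs : List α) (i j : Int) (v d : α)
    (h0 : 0 ≤ i) (hi : i < (xs.length : Int)) (hj : 0 ≤ j) :
    PySem.List.pyGetD (PySem.List.pySetD xs i v) j d =
      if j = i then v else PySem.List.pyGetD xs j d := by
  rw [PySem.List.pySetD_of_nonneg xs v h0]
  by_cases hjl : j < (xs.length : Int)
  · rw [PySem.List.pyGetD_eq_getElem _ d hj (by simpa using hjl),
        PySem.List.pyGetD_eq_getElem _ d hj hjl]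
    rw [List.getElem_set]
    split_ifs with h1 h2 h2 <;> try rfl
    · omega
    · omega
  · have hout : ¬ PySem.Raise.InRange xs.length j := by
      simp [PySem.Raise.InRange]; omega
    rw [if_neg (by omega)]
    rw [PySem.List.pyGetD_of_none, PySem.List.pyGetD_of_none]
    · rw [PySem.List.pyGet?_eq_none_iff]; exact hout
    · rw [PySem.List.pyGet?_eq_none_iff]; simpa using hout

-- wraparound: a negative in-range index reads the same cell as its nonnegative twin
theorem wrapGet {α : Type} (xs : List α) (x : Int) (d : α)
    (hlo : -(xs.length : Int) ≤ x) (hneg : x < 0) :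
    PySem.List.pyGetD xs x d = PySem.List.pyGetD xs (x + xs.length) d := by
  have hk1 : 0 < (-x).toNat := by omega
  have hk2 : (-x).toNat ≤ xs.length := by omega
  have hx : x = -(((-x).toNat : Nat) : Int) := by omega
  rw [hx, PySem.List.pyGetD_neg_natCast xs _ d hk1 hk2]
  rw [PySem.List.pyGetD_eq_getElem xs d (by omega) (by omega)]
  congr 1
  omega

-- the pure parent-walk iteration used by the invariant
def iterP (p : List Int) : Nat → Int → Int
  | 0, x => x
  | d + 1, x => iterP p d (PySem.List.pyGetD p x 0)

theorem solveFind_succ (p : List Int) (x : Int) (f : Nat) :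
    solveFind p x (f + 1) =
      if x = PySem.List.pyGetD p x 0 then x else solveFind p (PySem.List.pyGetD p x 0) f := rfl

theorem iterP_zero (p : List Int) (x : Int) : iterP p 0 x = x := rfl

theorem iterP_succ (p : List Int) (d : Nat) (x : Int) :
    iterP p (d + 1) x = iterP p d (PySem.List.pyGetD p x 0) := rfl

theorem iterP_fix (p : List Int) (x : Int) (h : PySem.List.pyGetD p x 0 = x) :
    ∀ d, iterP p d x = x := by
  intro d; induction d with
  | zero => rfl
  | succ d ih => simp [iterP, h, ih]

theorem iterP_after (p : List Int) :
    ∀ (d : Nat) (x r : Int), iterP p d x = r → PySem.List.pyGetD p r 0 = r →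
    ∀ m, d ≤ m → iterP p m x = r := by
  intro d
  induction d with
  | zero =>
    intro x r h1 h2 m _
    rw [iterP_zero] at h1; subst h1
    exact iterP_fix p x h2 m
  | succ d ih =>
    intro x r h1 h2 m hm
    obtain ⟨m', rfl⟩ : ∃ m', m = m' + 1 := ⟨m - 1, by omega⟩
    rw [iterP_succ] at h1 ⊢
    exact ih _ _ h1 h2 m' (by omega)

theorem reaches_unique (p : List Int) (x r r' : Int) (d d' : Nat)
    (h1 : iterP p d x = r) (h2 : PySem.List.pyGetD p r 0 = r)
    (h3 : iterP p d' x = r') (h4 : PySem.List.pyGetD p r' 0 = r') : r = r' := by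
  have e1 := iterP_after p d x r h1 h2 (max d d') (Nat.le_max_left _ _)
  have e2 := iterP_after p d' x r' h3 h4 (max d d') (Nat.le_max_right _ _)
  rw [e1] at e2; exact e2

theorem find_of_reaches (p : List Int) :
    ∀ (d : Nat) (x r : Int) (f : Nat), iterP p d x = r → PySem.List.pyGetD p r 0 = r →
    d < f → solveFind p x f = r := by
  intro d
  induction d with
  | zero =>
    intro x r f h1 h2 hf
    rw [iterP_zero] at h1; subst h1
    obtain ⟨f', rfl⟩ : ∃ f', f = f' + 1 := ⟨f - 1, by omega⟩
    rw [solveFind_succ, if_pos h2.symm]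
  | succ d ih =>
    intro x r f h1 h2 hf
    obtain ⟨f', rfl⟩ : ∃ f', f = f' + 1 := ⟨f - 1, by omega⟩
    rw [solveFind_succ]
    by_cases hx : x = PySem.List.pyGetD p x 0
    · rw [if_pos hx]
      have hfix : iterP p (d+1) x = x := iterP_fix p x hx.symm (d+1)
      rw [hfix] at h1; exact h1
    · rw [if_neg hx]
      rw [iterP_succ] at h1
      exact ih _ _ f' h1 h2 (by omega)

theorem find_wrap (p : List Int) (x x' : Int) (f : Nat)
    (hneg : x < 0) (hf : 1 ≤ f)
    (heq : PySem.List.pyGetD p x 0 = PySem.List.pyGetD p x' 0)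
    (hy : 0 ≤ PySem.List.pyGetD p x' 0) :
    solveFind p x (f + 1) = solveFind p x' (f + 1) := by
  have hxne : ¬ x = PySem.List.pyGetD p x 0 := by omega
  rw [solveFind_succ, if_neg hxne, heq, solveFind_succ]
  by_cases hroot : x' = PySem.List.pyGetD p x' 0
  · rw [if_pos hroot, ← hroot]
    exact find_of_reaches p 0 x' x' f (iterP_zero p x') hroot.symm (by omega)
  · rw [if_neg hroot]

theorem length_foldl_set (L : List Int) (v : Int) :
    ∀ c : List Int, (L.foldl (fun c x => PySem.List.pySetD c x v) c).length = c.length := by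
  induction L with
  | nil => intro c; rfl
  | cons x L ih =>
    intro c; simp only [List.foldl_cons]; rw [ih]; exact PySem.List.length_pySetD c x v

theorem relabel_get (v : Int) :
    ∀ (L : List Int) (c : List Int) (j : Int),
    (∀ x ∈ L, 0 ≤ x ∧ x < (c.length : Int)) → 0 ≤ j →
    PySem.List.pyGetD (L.foldl (fun c x => PySem.List.pySetD c x v) c) j 0 =
      if j ∈ L then v else PySem.List.pyGetD c j 0 := by
  intro L
  induction L with
  | nil => intro c j _ _; simp
  | cons x L ih =>
    intro c j hL hj
    simp only [List.foldl_cons]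
    have hx := hL x (List.mem_cons_self)
    have hlen : ((PySem.List.pySetD c x v).length : Int) = c.length := by
      rw [PySem.List.length_pySetD]
    rw [ih (PySem.List.pySetD c x v) j (fun y hy => by rw [hlen]; exact hL y (List.mem_cons_of_mem _ hy)) hj]
    have hset := getD_setD c x j v 0 hx.1 hx.2 hj
    by_cases hjL : j ∈ L
    · rw [if_pos hjL, if_pos (List.mem_cons_of_mem _ hjL)]
    · rw [if_neg hjL, hset]
      by_cases hjx : j = x
      · rw [if_pos hjx, if_pos (by simp [hjx])]
      · rw [if_neg hjx, if_neg (by simp [hjx, hjL])]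

-- the coupling invariant between A's state (p, size, ans) and B's (comp, size, weight, members)
-- after k processed edges: same size/weight lists (kept outside), comp is p's root map
-- (reachable within k steps), roots of comp are fixpoints of p, and members lists exactly
-- the classes of comp.
def InvP (A : Int) (k : Nat) (p comp : List Int) (mem : List (List Int)) : Prop :=
  p.length = (A + 1).toNat ∧ comp.length = (A + 1).toNat ∧ mem.length = (A + 1).toNat ∧
  (∀ j : Int, 0 ≤ j → j < A + 1 →
    (0 ≤ PySem.List.pyGetD p j 0 ∧ PySem.List.pyGetD p j 0 < A + 1) ∧
    (0 ≤ PySem.List.pyGetD comp j 0 ∧ PySem.List.pyGetD comp j 0 < A + 1) ∧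
    (∃ d ≤ k, iterP p d j = PySem.List.pyGetD comp j 0 ∧
      PySem.List.pyGetD p (PySem.List.pyGetD comp j 0) 0 = PySem.List.pyGetD comp j 0) ∧
    (PySem.List.pyGetD comp j 0 = j → PySem.List.pyGetD p j 0 = j) ∧
    j ∈ PySem.List.pyGetD mem (PySem.List.pyGetD comp j 0) []) ∧
  (∀ r : Int, 0 ≤ r → r < A + 1 → ∀ x ∈ PySem.List.pyGetD mem r [],
    0 ≤ x ∧ x < A + 1 ∧ PySem.List.pyGetD comp x 0 = r)

theorem inv_mono (A : Int) (k k' : Nat) (p comp : List Int) (mem : List (List Int))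
    (h : InvP A k p comp mem) (hk : k ≤ k') : InvP A k' p comp mem := by
  obtain ⟨h1, h2, h3, h4, h5⟩ := h
  refine ⟨h1, h2, h3, fun j hj0 hj1 => ?_, h5⟩
  obtain ⟨ha, hb, ⟨d, hd, hc⟩, he, hf⟩ := h4 j hj0 hj1
  exact ⟨ha, hb, ⟨d, by omega, hc⟩, he, hf⟩

theorem comp_idem (A : Int) (k : Nat) (p comp : List Int) (mem : List (List Int))
    (h : InvP A k p comp mem) (j : Int) (h0 : 0 ≤ j) (h1' : j < A + 1) :
    PySem.List.pyGetD comp (PySem.List.pyGetD comp j 0) 0 = PySem.List.pyGetD comp j 0 := by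
  obtain ⟨h1, h2, h3, h4, h5⟩ := h
  obtain ⟨_, ⟨hr0, hr1⟩, ⟨d, _, hiter, hfix⟩, _, _⟩ := h4 j h0 h1'
  obtain ⟨_, _, ⟨d', _, hiter', _⟩, _, _⟩ := h4 _ hr0 hr1
  rw [← hiter']
  exact iterP_fix p _ hfix d'

theorem comp_const (A : Int) (k : Nat) (p comp : List Int) (mem : List (List Int))
    (h : InvP A k p comp mem) (j : Int) (h0 : 0 ≤ j) (h1' : j < A + 1) :
    PySem.List.pyGetD comp (PySem.List.pyGetD p j 0) 0 = PySem.List.pyGetD comp j 0 := by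
  obtain ⟨h1, h2, h3, h4, h5⟩ := h
  obtain ⟨⟨hy0, hy1⟩, _, ⟨d, _, hiter, hfix⟩, _, _⟩ := h4 j h0 h1'
  obtain ⟨_, _, ⟨dy, _, hitery, hfixy⟩, _, _⟩ := h4 _ hy0 hy1
  match d with
  | 0 =>
    rw [iterP_zero] at hiter
    rw [← hiter] at hfix ⊢
    rw [hfix]
    exact hiter.symm
  | Nat.succ e =>
    rw [iterP_succ] at hiter
    exact reaches_unique p _ _ _ dy e hitery hfixy hiter hfix

theorem iter_child (p : List Int) (R Ch : Int)
    (hne : R ≠ Ch) (hR0 : 0 ≤ R) (hC0 : 0 ≤ Ch) (hChl : Ch < (p.length : Int))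
    (hpR : PySem.List.pyGetD p R 0 = R)
    (hnn : ∀ i : Int, 0 ≤ i → 0 ≤ PySem.List.pyGetD p i 0) :
    ∀ (d : Nat) (j : Int), 0 ≤ j → iterP p d j = Ch →
    iterP (PySem.List.pySetD p Ch R) (d + 1) j = R := by
  have hfixR : PySem.List.pyGetD (PySem.List.pySetD p Ch R) R 0 = R := by
    rw [getD_setD p Ch R R 0 hC0 hChl hR0, if_neg hne, hpR]
  intro d
  induction d with
  | zero =>
    intro j hj0 hj
    rw [iterP_zero] at hj
    rw [hj, iterP_succ, iterP_zero, getD_setD p Ch Ch R 0 hC0 hChl hC0, if_pos rfl]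
  | succ d ih =>
    intro j hj0 hj
    by_cases hjC : j = Ch
    · rw [hjC, iterP_succ, getD_setD p Ch Ch R 0 hC0 hChl hC0, if_pos rfl]
      exact iterP_fix _ R hfixR (d + 1)
    · rw [iterP_succ] at hj
      rw [iterP_succ, getD_setD p Ch j R 0 hC0 hChl hj0, if_neg hjC]
      exact ih _ (hnn j hj0) hj

theorem iter_other (A : Int) (p comp : List Int) (R Ch : Int)
    (hC0 : 0 ≤ Ch) (hChl : Ch < (p.length : Int))
    (hChr : PySem.List.pyGetD comp Ch 0 = Ch)
    (hvals : ∀ i : Int, 0 ≤ i → i < A + 1 →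
      0 ≤ PySem.List.pyGetD p i 0 ∧ PySem.List.pyGetD p i 0 < A + 1)
    (hconst : ∀ i : Int, 0 ≤ i → i < A + 1 →
      PySem.List.pyGetD comp (PySem.List.pyGetD p i 0) 0 = PySem.List.pyGetD comp i 0) :
    ∀ (d : Nat) (j : Int), 0 ≤ j → j < A + 1 → PySem.List.pyGetD comp j 0 ≠ Ch →
    iterP (PySem.List.pySetD p Ch R) d j = iterP p d j := by
  intro d
  induction d with
  | zero => intro j _ _ _; rw [iterP_zero, iterP_zero]
  | succ d ih =>
    intro j hj0 hj1 hjc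
    have hjC : j ≠ Ch := fun h => hjc (by rw [h]; exact hChr)
    rw [iterP_succ, iterP_succ, getD_setD p Ch j R 0 hC0 hChl hj0, if_neg hjC]
    have hy := hvals j hj0 hj1
    exact ih _ hy.1 hy.2 (by rw [hconst j hj0 hj1]; exact hjc)

theorem union_inv (A : Int) (hA : 0 ≤ A) (k : Nat) (p comp : List Int)
    (mem : List (List Int)) (hInv : InvP A k p comp mem) (R Ch : Int)
    (hR0 : 0 ≤ R) (hR1 : R < A + 1) (hC0 : 0 ≤ Ch) (hC1 : Ch < A + 1)
    (hRr : PySem.List.pyGetD comp R 0 = R) (hChr : PySem.List.pyGetD comp Ch 0 = Ch)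
    (hne : R ≠ Ch) :
    InvP A (k + 1) (PySem.List.pySetD p Ch R)
      ((PySem.List.pyGetD mem Ch []).foldl (fun c x => PySem.List.pySetD c x R) comp)
      (PySem.List.pySetD
        (PySem.List.pySetD mem R (PySem.List.pyGetD mem R [] ++ PySem.List.pyGetD mem Ch []))
        Ch []) := by
  obtain ⟨hp, hc, hm, h4, h5⟩ := hInv
  have hpl : (p.length : Int) = A + 1 := by rw [hp]; omega
  have hcl : (comp.length : Int) = A + 1 := by rw [hc]; omega
  have hml : (mem.length : Int) = A + 1 := by rw [hm]; omega
  set L := PySem.List.pyGetD mem Ch [] with hL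
  set p' := PySem.List.pySetD p Ch R with hp'def
  set comp' := L.foldl (fun c x => PySem.List.pySetD c x R) comp with hc'def
  set mem' := PySem.List.pySetD
    (PySem.List.pySetD mem R (PySem.List.pyGetD mem R [] ++ L)) Ch [] with hm'def
  -- members of L are exactly the comp-class of Ch
  have hLrange : ∀ x ∈ L, 0 ≤ x ∧ x < A + 1 ∧ PySem.List.pyGetD comp x 0 = Ch :=
    fun x hx => h5 Ch hC0 hC1 x hx
  have hLiff : ∀ j : Int, 0 ≤ j → j < A + 1 →
      (j ∈ L ↔ PySem.List.pyGetD comp j 0 = Ch) := by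
    intro j hj0 hj1
    constructor
    · intro hj; exact (hLrange j hj).2.2
    · intro hj
      have := (h4 j hj0 hj1).2.2.2.2
      rw [hj] at this; exact this
  -- value tables for the updated structures
  have hgetp' : ∀ j : Int, 0 ≤ j →
      PySem.List.pyGetD p' j 0 = if j = Ch then R else PySem.List.pyGetD p j 0 :=
    fun j hj => getD_setD p Ch j R 0 hC0 (by omega) hj
  have hgetc' : ∀ j : Int, 0 ≤ j → j < A + 1 →
      PySem.List.pyGetD comp' j 0 =
        if PySem.List.pyGetD comp j 0 = Ch then R else PySem.List.pyGetD comp j 0 := by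
    intro j hj0 hj1
    rw [hc'def, relabel_get R L comp j
      (fun x hx => ⟨(hLrange x hx).1, by rw [hcl]; exact (hLrange x hx).2.1⟩) hj0]
    by_cases hjL : j ∈ L
    · rw [if_pos hjL, if_pos ((hLiff j hj0 hj1).mp hjL)]
    · rw [if_neg hjL, if_neg (fun h => hjL ((hLiff j hj0 hj1).mpr h))]
  have hmlen1 : R < ((PySem.List.pySetD mem R (PySem.List.pyGetD mem R [] ++ L)).length : Int) := by
    rw [PySem.List.length_pySetD]; omega
  have hgetm' : ∀ j : Int, 0 ≤ j →
      PySem.List.pyGetD mem' j [] =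
        if j = Ch then []
        else if j = R then PySem.List.pyGetD mem R [] ++ L
        else PySem.List.pyGetD mem j [] := by
    intro j hj
    rw [hm'def, getD_setD _ Ch j ([] : List Int) [] hC0 (by rw [PySem.List.length_pySetD]; omega) hj]
    by_cases hjC : j = Ch
    · rw [if_pos hjC, if_pos hjC]
    · rw [if_neg hjC, if_neg hjC,
        getD_setD mem R j _ [] hR0 (by omega) hj]
  -- p-fixpoints at the two roots
  have hpR : PySem.List.pyGetD p R 0 = R := (h4 R hR0 hR1).2.2.2.1 hRr
  have hpCh : PySem.List.pyGetD p Ch 0 = Ch := (h4 Ch hC0 hC1).2.2.2.1 hChr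
  have hnn : ∀ i : Int, 0 ≤ i → 0 ≤ PySem.List.pyGetD p i 0 := by
    intro i hi
    by_cases hil : i < A + 1
    · exact ((h4 i hi hil).1).1
    · rw [PySem.List.pyGetD_of_none]
      rw [PySem.List.pyGet?_eq_none_iff]
      simp [PySem.Raise.InRange]; omega
  have hconst : ∀ i : Int, 0 ≤ i → i < A + 1 →
      PySem.List.pyGetD comp (PySem.List.pyGetD p i 0) 0 = PySem.List.pyGetD comp i 0 :=
    fun i h0 h1 => comp_const A k p comp mem ⟨hp, hc, hm, h4, h5⟩ i h0 h1
  have hvals : ∀ i : Int, 0 ≤ i → i < A + 1 →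
      0 ≤ PySem.List.pyGetD p i 0 ∧ PySem.List.pyGetD p i 0 < A + 1 :=
    fun i h0 h1 => (h4 i h0 h1).1
  have hfixR' : PySem.List.pyGetD p' R 0 = R := by
    rw [hgetp' R hR0, if_neg hne, hpR]
  refine ⟨by rw [hp'def, PySem.List.length_pySetD]; exact hp,
          by rw [hc'def, length_foldl_set]; exact hc,
          by rw [hm'def, PySem.List.length_pySetD, PySem.List.length_pySetD]; exact hm,
          ?_, ?_⟩
  · intro j hj0 hj1
    have hj4 := h4 j hj0 hj1
    obtain ⟨⟨hpj0, hpj1⟩, ⟨hcj0, hcj1⟩, ⟨d, hd, hiter, hfix⟩, hroot, hmem⟩ := hj4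
    by_cases hrj : PySem.List.pyGetD comp j 0 = Ch
    · -- j is in the absorbed class: its new root is R, one step further
      have hc'j : PySem.List.pyGetD comp' j 0 = R := by
        rw [hgetc' j hj0 hj1, if_pos hrj]
      rw [hc'j]
      refine ⟨?_, ⟨hR0, hR1⟩, ⟨d + 1, by omega, ?_, hfixR'⟩, ?_, ?_⟩
      · rw [hgetp' j hj0]
        by_cases hjC : j = Ch
        · rw [if_pos hjC]; exact ⟨hR0, hR1⟩
        · rw [if_neg hjC]; exact ⟨hpj0, hpj1⟩
      · exact iter_child p R Ch hne hR0 hC0 (by omega) hpR hnn d j hj0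
          (by rw [hiter, hrj])
      · intro hRj
        exfalso
        apply hne
        have hRC : PySem.List.pyGetD comp R 0 = Ch := by rw [hRj]; exact hrj
        rw [hRr] at hRC
        exact hRC
      · rw [hgetm' R hR0, if_neg hne, if_pos rfl]
        exact List.mem_append_right _ ((hLiff j hj0 hj1).mpr hrj)
    · -- j keeps its root
      have hc'j : PySem.List.pyGetD comp' j 0 = PySem.List.pyGetD comp j 0 := by
        rw [hgetc' j hj0 hj1, if_neg hrj]
      rw [hc'j]
      have hrjC : PySem.List.pyGetD comp j 0 ≠ Ch := hrj
      have hiter' : iterP p' d j = PySem.List.pyGetD comp j 0 := by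
        rw [hp'def, iter_other A p comp R Ch hC0 (by omega) hChr hvals hconst d j hj0 hj1 hrjC]
        exact hiter
      have hrfix : PySem.List.pyGetD p' (PySem.List.pyGetD comp j 0) 0 =
          PySem.List.pyGetD comp j 0 := by
        rw [hgetp' _ hcj0, if_neg ?_, hfix]
        intro h
        exact hrjC h
      refine ⟨?_, ⟨hcj0, hcj1⟩, ⟨d, by omega, hiter', hrfix⟩, ?_, ?_⟩
      · rw [hgetp' j hj0]
        by_cases hjC : j = Ch
        · rw [if_pos hjC]; exact ⟨hR0, hR1⟩
        · rw [if_neg hjC]; exact ⟨hpj0, hpj1⟩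
      · intro hcjj
        have hjC : j ≠ Ch := fun h => hrjC (by rw [h] at hcjj ⊢; exact hcjj)
        rw [hgetp' j hj0, if_neg hjC]
        exact hroot hcjj
      · rw [hgetm' _ hcj0, if_neg hrjC]
        by_cases hjR : PySem.List.pyGetD comp j 0 = R
        · rw [if_pos hjR]
          rw [hjR] at hmem
          exact List.mem_append_left _ hmem
        · rw [if_neg hjR]
          exact hmem
  · intro r hr0 hr1 x hx
    rw [hgetm' r hr0] at hx
    by_cases hrC : r = Ch
    · rw [if_pos hrC] at hx
      exact absurd hx (List.not_mem_nil)
    · rw [if_neg hrC] at hx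
      by_cases hrR : r = R
      · rw [if_pos hrR] at hx
        rcases List.mem_append.mp hx with hx1 | hx2
        · obtain ⟨hx0, hx1', hcx⟩ := h5 R hR0 hR1 x hx1
          refine ⟨hx0, hx1', ?_⟩
          rw [hgetc' x hx0 hx1', if_neg (by rw [hcx]; exact fun h => hne h), hcx, hrR]
        · obtain ⟨hx0, hx1', hcx⟩ := hLrange x hx2
          refine ⟨hx0, hx1', ?_⟩
          rw [hgetc' x hx0 hx1', if_pos hcx, hrR]
      · rw [if_neg hrR] at hx
        obtain ⟨hx0, hx1', hcx⟩ := h5 r hr0 hr1 x hx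
        refine ⟨hx0, hx1', ?_⟩
        rw [hgetc' x hx0 hx1', if_neg (by rw [hcx]; exact hrC), hcx]

theorem step_inv (A : Int) (hA : 0 ≤ A) (F k : Nat) (hk : k < F)
    (lr : Int × Int)
    (hl : (-(A + 1) ≤ lr.1 ∧ lr.1 < A + 1) ∧ (-(A + 1) ≤ lr.2 ∧ lr.2 < A + 1))
    (p comp sz ans : List Int) (mem : List (List Int))
    (hInv : InvP A k p comp mem) :
    (solveStepA F (p, sz, ans) lr).2.1 = (solveStepB (comp, sz, ans, mem) lr).2.1 ∧
    (solveStepA F (p, sz, ans) lr).2.2 = (solveStepB (comp, sz, ans, mem) lr).2.2.1 ∧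
    InvP A (k + 1) (solveStepA F (p, sz, ans) lr).1 (solveStepB (comp, sz, ans, mem) lr).1
      (solveStepB (comp, sz, ans, mem) lr).2.2.2 := by
  obtain ⟨hend_l, hend_r⟩ := hl
  have hInv' := hInv
  obtain ⟨hp, hc, hm, h4, h5⟩ := hInv
  have hpl : (p.length : Int) = A + 1 := by rw [hp]; omega
  have hcl : (comp.length : Int) = A + 1 := by rw [hc]; omega
  have key : ∀ x : Int, -(A + 1) ≤ x → x < A + 1 →
      solveFind p x (F + 1) = PySem.List.pyGetD comp x 0 := by
    intro x hx0 hx1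
    by_cases hneg : x < 0
    · obtain ⟨⟨hy0, _⟩, _, ⟨d, hd, hiter, hfix⟩, _, _⟩ :=
        h4 (x + (A + 1)) (by omega) (by omega)
      have heq : PySem.List.pyGetD p x 0 = PySem.List.pyGetD p (x + (A + 1)) 0 := by
        have := wrapGet p x 0 (by omega) hneg
        rw [show x + (p.length : Int) = x + (A + 1) by omega] at this
        exact this
      have hfw := find_wrap p x (x + (A + 1)) F hneg (by omega) heq hy0
      rw [hfw, find_of_reaches p d _ _ (F + 1) hiter hfix (by omega)]
      have hcw := wrapGet comp x 0 (by omega) hneg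
      rw [show x + (comp.length : Int) = x + (A + 1) by omega] at hcw
      exact hcw.symm
    · obtain ⟨_, _, ⟨d, hd, hiter, hfix⟩, _, _⟩ := h4 x (by omega) hx1
      exact find_of_reaches p d _ _ (F + 1) hiter hfix (by omega)
  have kroot : ∀ x : Int, -(A + 1) ≤ x → x < A + 1 →
      0 ≤ PySem.List.pyGetD comp x 0 ∧ PySem.List.pyGetD comp x 0 < A + 1 ∧
      PySem.List.pyGetD comp (PySem.List.pyGetD comp x 0) 0 = PySem.List.pyGetD comp x 0 := by
    intro x hx0 hx1
    by_cases hneg : x < 0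
    · have hcw := wrapGet comp x 0 (by omega) hneg
      rw [show x + (comp.length : Int) = x + (A + 1) by omega] at hcw
      rw [hcw]
      exact ⟨(h4 _ (by omega) (by omega)).2.1.1, (h4 _ (by omega) (by omega)).2.1.2,
        comp_idem A k p comp mem hInv' _ (by omega) (by omega)⟩
    · exact ⟨(h4 x (by omega) hx1).2.1.1, (h4 x (by omega) hx1).2.1.2,
        comp_idem A k p comp mem hInv' x (by omega) hx1⟩
  obtain ⟨hc10, hc11, hc1r⟩ := kroot lr.1 hend_l.1 hend_l.2
  obtain ⟨hc20, hc21, hc2r⟩ := kroot lr.2 hend_r.1 hend_r.2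
  dsimp only [solveStepA, solveStepB]
  rw [key lr.1 hend_l.1 hend_l.2, key lr.2 hend_r.1 hend_r.2]
  by_cases hcc : PySem.List.pyGetD comp lr.1 0 = PySem.List.pyGetD comp lr.2 0
  · rw [if_pos hcc, if_pos hcc]
    exact ⟨rfl, rfl, inv_mono A k (k + 1) p comp mem hInv' (by omega)⟩
  · rw [if_neg hcc, if_neg hcc]
    by_cases hsz : PySem.List.pyGetD sz (PySem.List.pyGetD comp lr.1 0) 0 <
        PySem.List.pyGetD sz (PySem.List.pyGetD comp lr.2 0) 0
    · rw [if_neg (by omega), if_pos hsz, if_pos hsz]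
      exact ⟨rfl, rfl, union_inv A hA k p comp mem hInv' _ _ hc20 hc21 hc10 hc11 hc2r hc1r
        (fun h => hcc h.symm)⟩
    · rw [if_pos (by omega), if_neg hsz, if_neg hsz]
      exact ⟨rfl, rfl, union_inv A hA k p comp mem hInv' _ _ hc10 hc11 hc20 hc21 hc1r hc2r hcc⟩

theorem loop_inv (A : Int) (hA : 0 ≤ A) (F : Nat) :
    ∀ (Cs : List (Int × Int)) (k : Nat) (p comp sz ans : List Int) (mem : List (List Int)),
    (∀ lr ∈ Cs, (-(A + 1) ≤ lr.1 ∧ lr.1 < A + 1) ∧ (-(A + 1) ≤ lr.2 ∧ lr.2 < A + 1)) →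
    k + Cs.length ≤ F → InvP A k p comp mem →
    (Cs.foldl (solveStepA F) (p, sz, ans)).2.2 =
      (Cs.foldl solveStepB (comp, sz, ans, mem)).2.2.1 ∧
    InvP A (k + Cs.length) (Cs.foldl (solveStepA F) (p, sz, ans)).1
      (Cs.foldl solveStepB (comp, sz, ans, mem)).1
      (Cs.foldl solveStepB (comp, sz, ans, mem)).2.2.2 := by
  intro Cs
  induction Cs with
  | nil =>
    intro k p comp sz ans mem _ _ hInv
    exact ⟨rfl, hInv⟩
  | cons lr Cs ih =>
    intro k p comp sz ans mem hsafe hlen hInv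
    simp only [List.length_cons] at hlen
    obtain ⟨e1, e2, hInv1⟩ := step_inv A hA F k (by omega) lr
      (hsafe lr List.mem_cons_self) p comp sz ans mem hInv
    have heta : ((solveStepB (comp, sz, ans, mem) lr).1,
        (solveStepA F (p, sz, ans) lr).2.1,
        (solveStepA F (p, sz, ans) lr).2.2,
        (solveStepB (comp, sz, ans, mem) lr).2.2.2) = solveStepB (comp, sz, ans, mem) lr := by
      rw [e1, e2]
    have hih := ih (k + 1) (solveStepA F (p, sz, ans) lr).1
      (solveStepB (comp, sz, ans, mem) lr).1
      (solveStepA F (p, sz, ans) lr).2.1 (solveStepA F (p, sz, ans) lr).2.2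
      (solveStepB (comp, sz, ans, mem) lr).2.2.2
      (fun e he => hsafe e (List.mem_cons_of_mem _ he)) (by omega) hInv1
    rw [List.foldl_cons, List.foldl_cons, ← heta]
    refine ⟨hih.1, ?_⟩
    rw [List.length_cons, show k + (Cs.length + 1) = (k + 1) + Cs.length by omega]
    exact hih.2

theorem init_inv (A : Int) (hA : 0 ≤ A) :
    InvP A 0 (PySem.List.pyRange 0 (A + 1) 1) (PySem.List.pyRange 0 (A + 1) 1)
      ((PySem.List.pyRange 0 (A + 1) 1).map (fun i => [i])) := by
  have hlen := rangeLen (A + 1) (by omega)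
  have hget : ∀ j : Int, 0 ≤ j → j < A + 1 →
      PySem.List.pyGetD (PySem.List.pyRange 0 (A + 1) 1) j 0 = j :=
    fun j h0 h1 => rangeGet (A + 1) j h0 h1
  have hmem : ∀ j : Int, 0 ≤ j → j < A + 1 →
      PySem.List.pyGetD ((PySem.List.pyRange 0 (A + 1) 1).map (fun i => [i])) j [] = [j] :=
    fun j h0 h1 => PySem.List.pyGetD_map_pyRange_of_nonneg (fun i => [i]) (A + 1) j [] h0 h1
  refine ⟨hlen, hlen, by rw [List.length_map]; exact hlen, ?_, ?_⟩
  · intro j h0 h1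
    rw [hget j h0 h1]
    exact ⟨⟨h0, h1⟩, ⟨h0, h1⟩, ⟨0, Nat.le_refl 0, iterP_zero _ _, hget j h0 h1⟩,
      fun _ => rfl, by rw [hmem j h0 h1]; exact List.mem_singleton.mpr rfl⟩
  · intro r h0 h1 x hx
    rw [hmem r h0 h1] at hx
    rw [List.mem_singleton] at hx
    subst hx
    exact ⟨h0, h1, hget x h0 h1⟩

-- ===== VERDICT (by name: the statement is the Claim_ definition above) =====
theorem solve_spec : Claim_equal_solve := by
  intro A B C D _ hpre
  obtain ⟨hlenB, hAC, hsafe⟩ := hpre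
  show solve A B C D = solve_alt A B C D
  by_cases hA : 0 ≤ A
  · have hmain := loop_inv A hA C.length C 0
      (PySem.List.pyRange 0 (A + 1) 1) (PySem.List.pyRange 0 (A + 1) 1)
      (List.replicate (A + 1).toNat (1 : Int)) ((0 : Int) :: B)
      ((PySem.List.pyRange 0 (A + 1) 1).map (fun i => [i]))
      hsafe (by omega) (init_inv A hA)
    obtain ⟨hans, hinv⟩ := hmain
    obtain ⟨_, _, _, h4, _⟩ := hinv
    unfold solve solve_alt
    refine PySem.List.foldl_congr_mem _ _ _ 0 ?_
    intro acc i hi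
    obtain ⟨hi1, hi2⟩ := PySem.List.mem_pyRange_one.mp hi
    rw [rangeGet (A + 1) i (by omega) hi2, hans]
    refine if_congr (and_congr ?_ Iff.rfl) rfl rfl
    obtain ⟨_, _, ⟨d, _, hiter, _⟩, hroot, _⟩ := h4 i (by omega) hi2
    constructor
    · intro hpi
      rw [← hiter]
      exact iterP_fix _ i hpi.symm d
    · intro hci
      exact (hroot hci).symm
  · have hC : C = [] := by
      rcases hAC with h | h
      · omega
      · exact h
    subst hC
    unfold solve solve_alt
    rw [rangeNil 1 (A + 1) (by omega)]
    rfl
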